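-- pv_equiv track=rewrite | github.com/zeddo123/coding-interview-problem | oscillogram.py | crest
-- ===== SOURCE A (Python) =====
-- def crest(max_point):
-- 	# creating the histogram liste [1..max_point..1]
-- 	l = [i for i in range(1,max_point+1)]
-- 	l += l[::-1][1::]
--
-- 	crest_top = []
-- 	for x in range(max_point):
-- 		ch = len(l) * [' ']
-- 		maximum = max(l)
--
-- 		for i in range(len(l)):
-- 			if l[i] == maximum:
-- 				ch[i] = '\\'
-- 				l[i] -= 1
--
-- 		crest_top.append(' '.join(ch))
--
-- 	crest_buttom = [' '.join(len(l) * [' ']) for x in range(max_point)]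
--
-- 	return crest_top + crest_buttom
-- ===== SOURCE B (Python) =====
-- def crest(max_point):
--     l = list(range(1, max_point + 1)) + list(range(max_point - 1, 0, -1))
--     n = len(l)
--     top = [' '.join('\\' if v >= max_point - x else ' ' for v in l)
--            for x in range(max_point)]
--     bottom = [' '.join([' '] * n) for _ in range(max_point)]
--     return top + bottom
-- ===== Notes on version B (the rewrite author's own statement) =====
-- stated objective: simpler
-- what changed: B builds each crest row directly from the closed-form threshold test l[i] >= max_point - x on the immutable value list, replacing A's stateful simulation that rescans for max() and decrements the list in place each row.
import Mathlib
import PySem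

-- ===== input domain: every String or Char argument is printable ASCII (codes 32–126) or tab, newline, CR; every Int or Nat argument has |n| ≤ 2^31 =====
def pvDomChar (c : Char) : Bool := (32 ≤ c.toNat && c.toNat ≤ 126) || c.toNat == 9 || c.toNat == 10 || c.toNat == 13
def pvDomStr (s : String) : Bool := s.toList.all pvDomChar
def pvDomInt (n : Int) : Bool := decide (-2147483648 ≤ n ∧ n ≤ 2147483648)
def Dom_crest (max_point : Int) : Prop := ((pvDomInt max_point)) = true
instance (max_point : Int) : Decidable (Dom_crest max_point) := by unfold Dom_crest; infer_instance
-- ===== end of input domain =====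

-- B builds each crest row directly from the threshold test l[i] >= max_point - x on the immutable value
-- list instead of A's mutable max-and-decrement simulation (objective: simpler).

-- ===== PORT A =====
-- body of A's inner 'for i in range(len(l)):' loop; p = (ch, l)
def crestInner (maximum : Int) (p : List String × List Int) (i : Int) : List String × List Int :=
  if PySem.List.pyGetD p.2 i 0 == maximum then
    (PySem.List.pySetD p.1 i "\\", PySem.List.pySetD p.2 i (PySem.List.pyGetD p.2 i 0 - 1))
  else p

-- body of A's outer 'for x in range(max_point):' loop; st = (l, crest_top)
def crestStep (st : List Int × List String) (_x : Int) : List Int × List String :=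
  let ch := PySem.List.pyRepeat [" "] (st.1.length : Int)
  let maximum := (PySem.List.max? st.1 (fun y => y)).getD 0
  let r := (PySem.List.pyRange 0 (st.1.length : Int) 1).foldl (crestInner maximum) (ch, st.1)
  (r.2, st.2 ++ [PySem.Str.join " " r.1])

def crest (max_point : Int) : List String :=
  let l0 := PySem.List.pyRange 1 (max_point + 1) 1
  -- l += l[::-1][1::]
  let l := l0 ++ PySem.List.slice ((PySem.List.slice? l0 none none (-1)).getD []) (some 1) none
  let r := (PySem.List.pyRange 0 max_point 1).foldl crestStep (l, [])
  r.2 ++ (PySem.List.pyRange 0 max_point 1).map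
    (fun _ => PySem.Str.join " " (PySem.List.pyRepeat [" "] (r.1.length : Int)))

-- ===== PORT B =====
def crest_alt (max_point : Int) : List String :=
  let l := PySem.List.pyRange 1 (max_point + 1) 1 ++ PySem.List.pyRange (max_point - 1) 0 (-1)
  let n := l.length
  let top := (PySem.List.pyRange 0 max_point 1).map (fun x =>
    PySem.Str.join " " (l.map (fun v => if max_point - x ≤ v then "\\" else " ")))
  let bottom := (PySem.List.pyRange 0 max_point 1).map (fun _ =>
    PySem.Str.join " " (List.replicate n " "))
  top ++ bottom

-- ===== PRECONDITION & SPEC =====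
def Spec_crest (max_point : Int) (out : List String) : Prop := out = crest_alt max_point
instance (max_point : Int) (out : List String) : Decidable (Spec_crest max_point out) := by unfold Spec_crest; infer_instance

-- ===== CLAIM (what is proved, stated in full; the proofs are below) =====
def Claim_equal_crest : Prop := ∀ (max_point : Int), Dom_crest max_point → Spec_crest max_point (crest max_point)

-- ===== LEMMAS AND PROOFS =====

theorem zipWith_replicate_len {α β γ : Type} (f : α → β → γ) (xs : List α) (b : β) :
    List.zipWith f xs (List.replicate xs.length b) = xs.map (fun v => f v b) := by
  induction xs with
  | nil => rfl
  | cons x t ih => simp [List.replicate_succ, ih]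

-- max(xs) is the (unique) upper bound that belongs to the list
theorem max?_eq_of_mem_ub (xs : List Int) (a : Int) (ha : a ∈ xs) (hub : ∀ y ∈ xs, y ≤ a) :
    PySem.List.max? xs (fun y => y) = some a := by
  cases hmx : PySem.List.max? xs (fun y => y) with
  | none =>
    rw [PySem.List.max?_eq_none_iff] at hmx
    subst hmx; simp at ha
  | some mx =>
    have h1 := PySem.List.max?_isMax hmx a ha
    have h2 := hub mx (PySem.List.max?_mem hmx)
    simp only [] at h1
    have : mx = a := le_antisymm h2 h1
    rw [this]

-- A's inner loop, run over indices |lA| .. |lA|+|lB|, marks/decrements exactly the positions equal to t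
theorem inner_go (t : Int) (chA : List String) (lA : List Int) (chB : List String) (lB : List Int)
    (hA : chA.length = lA.length) (hB : chB.length = lB.length) :
    (PySem.List.pyRange (lA.length : Int) ((lA.length : Int) + (lB.length : Int)) 1).foldl
        (crestInner t) (chA ++ chB, lA ++ lB)
      = (chA ++ List.zipWith (fun v c => if v = t then "\\" else c) lB chB,
         lA ++ lB.map (fun v => if v = t then v - 1 else v)) := by
  induction lB generalizing chA lA chB with
  | nil =>
    have : chB = [] := List.eq_nil_of_length_eq_zero (by simpa using hB)
    subst this
    simp [PySem.List.pyRange_one_eq_nil]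
  | cons v lB' ih =>
    cases chB with
    | nil => simp at hB
    | cons c chB' =>
      have hB' : chB'.length = lB'.length := by simpa using hB
      have hlt : (lA.length : Int) < (lA.length : Int) + ((v :: lB').length : Int) := by
        simp only [List.length_cons]
        push_cast
        omega
      rw [PySem.List.pyRange_one_cons hlt]
      rw [List.foldl_cons]
      have hget : PySem.List.pyGetD (lA ++ v :: lB') (lA.length : Int) 0 = v := by
        simp [List.getD]
      have hstep : crestInner t (chA ++ c :: chB', lA ++ v :: lB') (lA.length : Int)
          = ((chA ++ [if v = t then "\\" else c]) ++ chB', (lA ++ [if v = t then v - 1 else v]) ++ lB') := by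
        unfold crestInner
        rw [hget]
        by_cases hv : v = t
        · simp [hv, PySem.List.pySetD_natCast, ← hA]
        · simp [hv]
      rw [hstep]
      have hlen1 : ((chA ++ [if v = t then "\\" else c]).length = (lA ++ [if v = t then v - 1 else v]).length) := by
        simp [hA]
      have := ih (chA ++ [if v = t then "\\" else c]) (lA ++ [if v = t then v - 1 else v]) chB' hlen1 hB'
      have harg : ((lA ++ [if v = t then v - 1 else v]).length : Int) = (lA.length : Int) + 1 := by simp
      rw [harg] at this
      have harg2 : ((lA.length : Int) + 1 + (lB'.length : Int)) = (lA.length : Int) + ((v :: lB').length : Int) := by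
        simp only [List.length_cons]
        push_cast
        omega
      rw [harg2] at this
      rw [this]
      by_cases hv : v = t <;> simp [hv]

-- invariant of A's outer loop: after the iterations before k the list holds min(v, M-k),
-- and the remaining iterations k..M emit exactly B's threshold rows
theorem outer_go (l0 : List Int) (M : Int) (hmem : M ∈ l0) (hub : ∀ v ∈ l0, v ≤ M) :
    ∀ (d : Nat) (k : Int), 0 ≤ k → M - k = (d : Int) → ∀ acc : List String,
    (PySem.List.pyRange k M 1).foldl crestStep (l0.map (fun v => min v (M - k)), acc)
      = (l0.map (fun v => min v 0),
         acc ++ (PySem.List.pyRange k M 1).map (fun x =>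
           PySem.Str.join " " (l0.map (fun v => if M - x ≤ v then "\\" else " ")))) := by
  intro d
  induction d with
  | zero =>
    intro k hk h0 acc
    have hkM : k = M := by omega
    subst hkM
    simp [PySem.List.pyRange_one_eq_nil (le_refl k)]
  | succ d ih =>
    intro k hk hd acc
    have hkM : k < M := by omega
    rw [PySem.List.pyRange_one_cons hkM]
    rw [List.foldl_cons, List.map_cons]
    have hmax : PySem.List.max? (l0.map (fun v => min v (M - k))) (fun y => y) = some (M - k) := by
      apply max?_eq_of_mem_ub
      · exact List.mem_map.2 ⟨M, hmem, by omega⟩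
      · intro y hy
        rcases List.mem_map.1 hy with ⟨v, hv, rfl⟩
        omega
    have hinner := inner_go (M - k) [] [] (List.replicate (l0.map (fun v => min v (M - k))).length " ")
        (l0.map (fun v => min v (M - k))) rfl (by simp)
    simp only [List.nil_append, List.length_nil, Nat.cast_zero, zero_add] at hinner
    have hstep : crestStep (l0.map (fun v => min v (M - k)), acc) k
        = (l0.map (fun v => min v (M - (k + 1))),
           acc ++ [PySem.Str.join " " (l0.map (fun v => if M - k ≤ v then "\\" else " "))]) := by
      unfold crestStep
      simp only [hmax, Option.getD_some]
      rw [show PySem.List.pyRepeat [" "] (((l0.map (fun v => min v (M - k))).length : Int))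
            = List.replicate (l0.map (fun v => min v (M - k))).length " " by
          rw [PySem.List.pyRepeat_singleton]; simp]
      rw [hinner]
      dsimp only
      rw [Prod.mk.injEq]
      constructor
      · -- l component
        rw [List.map_map]
        apply List.map_congr_left
        intro v _
        simp only [Function.comp]
        by_cases h : M - k ≤ v
        · have h2 : M - (k + 1) ≤ v := by omega
          simp [min_eq_right h, min_eq_right h2]
          omega
        · rw [min_eq_left (by omega)]
          rw [if_neg (by omega)]
          rw [min_eq_left (by omega)]
      · -- string row component
        rw [zipWith_replicate_len, List.map_map]
        have hfun : ((fun v => if v = M - k then "\\" else " ") ∘ (fun v => min v (M - k)))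
            = (fun v : Int => if M - k ≤ v then "\\" else " ") := by
          funext v
          simp only [Function.comp_apply]
          by_cases h : M - k ≤ v
          · rw [min_eq_right h, if_pos rfl, if_pos h]
          · rw [min_eq_left (by omega), if_neg (by omega), if_neg h]
        rw [hfun]
    rw [hstep]
    rw [ih (k + 1) (by omega) (by omega)]
    simp

theorem crest_eq_alt (m : Int) : crest m = crest_alt m := by
  by_cases hm : m ≤ 0
  · simp [crest, crest_alt,
      PySem.List.pyRange_one_eq_nil (show m + 1 ≤ 1 by omega),
      PySem.List.pyRange_one_eq_nil hm,
      PySem.List.pyRange_neg_one_eq_nil (show m - 1 ≤ 0 by omega),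
      PySem.List.slice?_none_none_neg_one]
  · push_neg at hm
    have h1 : 1 ≤ m := hm
    have hR : PySem.List.pyRange 1 (m + 1) 1 = PySem.List.pyRange 1 m 1 ++ [m] :=
      PySem.List.pyRange_one_succ_right h1
    have hA : PySem.List.slice
        ((PySem.List.slice? (PySem.List.pyRange 1 (m + 1) 1) none none (-1)).getD []) (some 1) none
        = (PySem.List.pyRange 1 m 1).reverse := by
      rw [PySem.List.slice?_none_none_neg_one, Option.getD_some, PySem.List.slice_from_one]
      rw [hR]
      simp
    have hB : PySem.List.pyRange (m - 1) 0 (-1) = (PySem.List.pyRange 1 m 1).reverse := by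
      rw [PySem.List.pyRange_neg_one_eq_reverse]
      norm_num
    set l0 : List Int := PySem.List.pyRange 1 (m + 1) 1 ++ (PySem.List.pyRange 1 m 1).reverse with hl0
    have hmem : m ∈ l0 := by
      apply List.mem_append_left
      rw [PySem.List.mem_pyRange_one]
      omega
    have hub : ∀ v ∈ l0, v ≤ m := by
      intro v hv
      rcases List.mem_append.1 hv with h | h
      · have := (PySem.List.mem_pyRange_one).1 h
        omega
      · have := (PySem.List.mem_pyRange_one).1 (List.mem_reverse.1 h)
        omega
    have hinit : l0.map (fun v => min v m) = l0 := by
      rw [show l0.map (fun v => min v m) = l0.map id from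
        List.map_congr_left (fun v hv => by have := hub v hv; simp; omega)]
      exact List.map_id l0
    have hout : (PySem.List.pyRange 0 m 1).foldl crestStep (l0, []) =
        (l0.map (fun v => min v 0),
         [] ++ (PySem.List.pyRange 0 m 1).map (fun x =>
           PySem.Str.join " " (l0.map (fun v => if m - x ≤ v then "\\" else " ")))) := by
      have := outer_go l0 m hmem hub m.toNat 0 (le_refl 0) (by omega) []
      rwa [sub_zero, hinit] at this
    simp only [crest, crest_alt, hA, hB, ← hl0, hout]
    simp [PySem.List.pyRepeat_singleton]

-- ===== VERDICT (by name: the statement is the Claim_ definition above) =====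
theorem crest_spec : Claim_equal_crest := by
  intro m _
  exact crest_eq_alt m
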